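-- pv_equiv track=rewrite | github.com/kurmasz-SampleCode/CIS500-SampleCode | AlgorithmAnalysis/examples.py | trick2
-- ===== SOURCE A (Python) =====
-- def location_of_max(lst):
--     loc_of_max = 0;
--     for index, value in enumerate(lst):
--       if (lst[index] > lst[loc_of_max]):
--         loc_of_max = index
--     return loc_of_max
--
-- def trick2(lst):
--     total = 0
--     for i in range(0, len(lst)):
--       if (i % 2 == 0):
--         total += location_of_max(lst)
--       else:
--         total += lst[i]
--     return total
-- ===== SOURCE B (Python) =====
-- def trick2(lst):
--     if not lst:
--         return 0
--     loc = lst.index(max(lst))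
--     evens = (len(lst) + 1) // 2
--     odd_sum = sum(v for i, v in enumerate(lst) if i % 2 == 1)
--     return loc * evens + odd_sum
-- ===== Notes on version B (the rewrite author's own statement) =====
-- stated objective: faster
-- what changed: A recomputes location_of_max over the whole list at every even index (O(n^2)); B computes lst.index(max(lst)) once, multiplies it by the closed-form count of even indices (len+1)//2, and adds the odd-index sum in a single pass.
import Mathlib
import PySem

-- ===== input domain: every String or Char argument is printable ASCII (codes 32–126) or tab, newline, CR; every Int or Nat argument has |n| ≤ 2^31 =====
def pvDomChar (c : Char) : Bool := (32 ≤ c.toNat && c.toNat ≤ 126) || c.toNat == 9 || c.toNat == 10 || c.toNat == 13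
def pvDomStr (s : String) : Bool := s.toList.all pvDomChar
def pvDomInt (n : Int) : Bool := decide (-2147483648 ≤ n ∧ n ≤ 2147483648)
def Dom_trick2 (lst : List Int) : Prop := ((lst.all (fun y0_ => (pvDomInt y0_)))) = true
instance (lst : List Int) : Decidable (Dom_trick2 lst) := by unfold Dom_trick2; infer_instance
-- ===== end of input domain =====

-- B replaces A's quadratic loop (location_of_max recomputed at every even index) by one
-- location_of_max computation, a closed-form count of even indices and one odd-index sum.

-- ===== PORT A =====
def locationOfMax (lst : List Int) : Int :=
  (PySem.List.enumerate lst).foldl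
    (fun locOfMax p =>
      if PySem.List.pyGetD lst p.1 0 > PySem.List.pyGetD lst locOfMax 0 then p.1 else locOfMax)
    0

def trick2 (lst : List Int) : Int :=
  (PySem.List.pyRange 0 (PySem.List.len lst)).foldl
    (fun total i =>
      if PySem.Int.mod i 2 == 0 then total + locationOfMax lst
      else total + PySem.List.pyGetD lst i 0)
    0

-- ===== PORT B =====
def trick2_alt (lst : List Int) : Int :=
  if lst = [] then 0
  else
    -- loc = lst.index(max(lst)); on a nonempty list both always succeed (the 0 arms are dead code)
    let loc : Int :=
      match PySem.List.max? lst (fun x => x) with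
      | none => 0
      | some m =>
        match PySem.List.index? lst m with
        | none => 0
        | some k => (k : Int)
    let evens : Int := PySem.Int.floordiv (PySem.List.len lst + 1) 2
    let oddSum : Int :=
      (PySem.List.enumerate lst).foldl
        (fun acc p => if PySem.Int.mod p.1 2 == 1 then acc + p.2 else acc) 0
    loc * evens + oddSum

-- ===== PRECONDITION & SPEC =====
def Spec_trick2 (lst : List Int) (out : Int) : Prop := out = trick2_alt lst
instance (lst : List Int) (out : Int) : Decidable (Spec_trick2 lst out) := by unfold Spec_trick2; infer_instance

-- ===== CLAIM (what is proved, stated in full; the proofs are below) =====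
def Claim_equal_trick2 : Prop := ∀ (lst : List Int), Dom_trick2 lst → Spec_trick2 lst (trick2 lst)

-- ===== LEMMAS AND PROOFS =====

theorem enumerate_append_singleton (l : List Int) (x : Int) (s : Int) :
    PySem.List.enumerate (l ++ [x]) s
      = PySem.List.enumerate l s ++ [(s + l.length, x)] := by
  induction l generalizing s with
  | nil => simp [PySem.List.enumerate]
  | cons a t ih => simp [PySem.List.enumerate, ih]; ring

-- A's main loop, with the (constant) helper value abstracted as c, equals
-- c * ceil(n/2) + the odd-index sum computed exactly as B's enumerate fold.
theorem main_sum (lst : List Int) (c : Int) :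
    (PySem.List.pyRange 0 (PySem.List.len lst)).foldl
      (fun total i => if PySem.Int.mod i 2 == 0 then total + c
                      else total + PySem.List.pyGetD lst i 0) 0
    = c * PySem.Int.floordiv (PySem.List.len lst + 1) 2
      + (PySem.List.enumerate lst).foldl
          (fun acc p => if PySem.Int.mod p.1 2 == 1 then acc + p.2 else acc) 0 := by
  induction lst using List.reverseRecOn with
  | nil => simp [PySem.List.len, PySem.List.pyRange, PySem.List.enumerate, PySem.Int.floordiv]
  | append_singleton l x ih =>
      have hn : PySem.List.len (l ++ [x]) = (l.length : Int) + 1 := by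
        simp [PySem.List.len]
      have hl : PySem.List.len l = (l.length : Int) := by simp [PySem.List.len]
      rw [hl] at ih
      rw [hn, enumerate_append_singleton,
          PySem.List.pyRange_one_succ_right (by positivity)]
      rw [List.foldl_append, List.foldl_append]
      have hcongr :
          (PySem.List.pyRange 0 (l.length : Int)).foldl
            (fun total i => if PySem.Int.mod i 2 == 0 then total + c
                            else total + PySem.List.pyGetD (l ++ [x]) i 0) 0
          = (PySem.List.pyRange 0 (l.length : Int)).foldl
            (fun total i => if PySem.Int.mod i 2 == 0 then total + c
                            else total + PySem.List.pyGetD l i 0) 0 := by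
        refine PySem.List.foldl_congr_mem _ _ _ _ ?_
        intro acc i hi
        rw [PySem.List.mem_pyRange_one] at hi
        have h0 : PySem.List.pyGetD (l ++ [x]) i 0 = PySem.List.pyGetD l i 0 := by
          rw [PySem.List.pyGetD_eq_getElem _ _ hi.1 (by simp; omega),
              PySem.List.pyGetD_eq_getElem _ _ hi.1 (by omega)]
          exact List.getElem_append_left (by omega)
        rw [h0]
      rw [hcongr, ih]
      simp only [List.foldl_cons, List.foldl_nil, zero_add]
      have hx : PySem.List.pyGetD (l ++ [x]) (l.length : Int) 0 = x := by
        rw [PySem.List.pyGetD_eq_getElem _ _ (by positivity) (by simp)]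
        simp
      have hmod : PySem.Int.mod ((l.length : Int)) 2 = ((l.length % 2 : Nat) : Int) := by
        rw [PySem.Int.mod_eq_emod_of_pos (by norm_num : (0:Int) < 2)]
        omega
      have hfd : ∀ m : Nat, PySem.Int.floordiv ((m : Int)) 2 = ((m / 2 : Nat) : Int) := by
        intro m
        rw [PySem.Int.floordiv_eq_ediv_of_pos (by norm_num : (0:Int) < 2)]
        omega
      have h1 : ((l.length : Int) + 1 + 1) = (((l.length + 2 : Nat)) : Int) := by push_cast; ring
      have h2 : ((l.length : Int) + 1) = (((l.length + 1 : Nat)) : Int) := by push_cast; ring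
      rw [hx, hmod, h1, h2, hfd, hfd]
      rcases Nat.even_or_odd l.length with he | ho
      · have hp : l.length % 2 = 0 := Nat.even_iff.mp he
        simp [hp]
        have h3 : ((l.length:Int) + 1) / 2 = (l.length:Int) / 2 := by omega
        rw [h3]; ring
      · have hp : l.length % 2 = 1 := Nat.odd_iff.mp ho
        simp [hp]
        have h3 : ((l.length:Int) + 1) / 2 = (l.length:Int) / 2 + 1 := by omega
        rw [h3]; ring

-- the loop body of location_of_max
def step (lst : List Int) : Int → Int × Int → Int := fun locOfMax p =>
  if PySem.List.pyGetD lst p.1 0 > PySem.List.pyGetD lst locOfMax 0 then p.1 else locOfMax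

-- invariant of A's helper loop: the accumulator is a first-argmax of the scanned prefix
theorem loc_inv (lst : List Int) (suf : List Int) :
    ∀ (s loc : Nat), lst.drop s = suf → loc < lst.length →
    (∀ i, i < s → lst.getD i 0 ≤ lst.getD loc 0) →
    (∀ i, i < loc → lst.getD i 0 < lst.getD loc 0) →
    ∃ j : Nat, (PySem.List.enumerate suf (s : Int)).foldl (step lst) (loc : Int) = (j : Int)
      ∧ j < lst.length
      ∧ (∀ i, i < s + suf.length → lst.getD i 0 ≤ lst.getD j 0)
      ∧ (∀ i, i < j → lst.getD i 0 < lst.getD j 0) := by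
  induction suf with
  | nil =>
      intro s loc _ hlt hmax hfirst
      exact ⟨loc, by simp [PySem.List.enumerate], hlt, by simpa using hmax, hfirst⟩
  | cons a t ih =>
      intro s loc hdrop hlt hmax hfirst
      have hs : s < lst.length := by
        by_contra h
        rw [List.drop_eq_nil_of_le (by omega)] at hdrop
        simp at hdrop
      have ha : lst.getD s 0 = a := by
        have h0 : lst[s]? = some a := by
          have := congrArg (fun l => l[0]?) hdrop
          simpa [List.getElem?_drop] using this
        rw [List.getD_eq_getElem _ _ hs]
        exact Option.some_injective _ (by rw [← h0, List.getElem?_eq_getElem hs])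
      have hdrop' : lst.drop (s+1) = t := by
        have := congrArg List.tail hdrop
        simpa [List.tail_drop] using this
      simp only [PySem.List.enumerate, List.foldl_cons]
      have hstep : step lst (loc : Int) ((s : Int), a)
          = if lst.getD s 0 > lst.getD loc 0 then (s : Int) else (loc : Int) := by
        simp [step]
      rw [hstep]
      by_cases hgt : lst.getD s 0 > lst.getD loc 0
      · rw [if_pos hgt]
        have hmax' : ∀ i, i < s + 1 → lst.getD i 0 ≤ lst.getD s 0 := by
          intro i hi
          rcases Nat.lt_or_ge i s with h | h
          · exact le_of_lt (lt_of_le_of_lt (hmax i h) hgt)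
          · have : i = s := by omega
            simp [this]
        have hfirst' : ∀ i, i < s → lst.getD i 0 < lst.getD s 0 := by
          intro i hi; exact lt_of_le_of_lt (hmax i hi) hgt
        have := ih (s+1) s hdrop' hs hmax' hfirst'
        push_cast at this ⊢
        simpa [Nat.add_assoc, Nat.add_comm, Nat.add_left_comm] using this
      · rw [if_neg hgt]
        have hmax' : ∀ i, i < s + 1 → lst.getD i 0 ≤ lst.getD loc 0 := by
          intro i hi
          rcases Nat.lt_or_ge i s with h | h
          · exact hmax i h
          · have heq : i = s := by omega
            subst heq
            exact not_lt.mp hgt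
        have := ih (s+1) loc hdrop' hlt hmax' hfirst
        push_cast at this ⊢
        simpa [Nat.add_assoc, Nat.add_comm, Nat.add_left_comm] using this

theorem locationOfMax_spec (lst : List Int) (h : lst ≠ []) :
    ∃ j : Nat, locationOfMax lst = (j : Int)
      ∧ j < lst.length
      ∧ (∀ i, i < lst.length → lst.getD i 0 ≤ lst.getD j 0)
      ∧ (∀ i, i < j → lst.getD i 0 < lst.getD j 0) := by
  have h0 : 0 < lst.length := List.length_pos_iff.mpr h
  have := loc_inv lst lst 0 0 (by simp) h0 (by omega) (by omega)
  simpa [locationOfMax, step] using this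

theorem trick2_spec' (lst : List Int) : trick2 lst = trick2_alt lst := by
  by_cases hnil : lst = []
  · subst hnil
    simp [trick2, trick2_alt, PySem.List.len, PySem.List.pyRange]
  · obtain ⟨j, hloc, hj, hmax, hfirst⟩ := locationOfMax_spec lst hnil
    -- max(lst) is lst[j]
    obtain ⟨m, hm⟩ : ∃ m, PySem.List.max? lst (fun x => x) = some m := by
      cases hmx : PySem.List.max? lst (fun x => x) with
      | none => exact absurd ((PySem.List.max?_eq_none_iff lst (fun x => x)).mp hmx) hnil
      | some m => exact ⟨m, rfl⟩
    have hmval : m = lst.getD j 0 := by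
      have h1 : lst.getD j 0 ≤ m := by
        have : lst.getD j 0 ∈ lst := by
          rw [List.getD_eq_getElem _ _ hj]; exact List.getElem_mem hj
        simpa using PySem.List.max?_isMax hm _ this
      have h2 : m ≤ lst.getD j 0 := by
        have hmem : m ∈ lst := PySem.List.max?_mem hm
        obtain ⟨k, hk, hkv⟩ := List.mem_iff_getElem.mp hmem
        have := hmax k hk
        rwa [List.getD_eq_getElem _ _ hk, hkv] at this
      omega
    -- lst.index(m) is j
    have hidx : PySem.List.index? lst m = some j := by
      rw [PySem.List.index?_eq_some_iff]
      refine ⟨lst.take j, lst.drop (j+1), ?_, ?_, ?_⟩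
      · conv_lhs => rw [← List.take_append_drop j lst]
        rw [List.drop_eq_getElem_cons hj]
        rw [hmval, List.getD_eq_getElem _ _ hj]
      · simp [List.length_take]; omega
      · intro hmem
        obtain ⟨k, hk, hkv⟩ := List.mem_iff_getElem.mp hmem
        have hkj : k < j := by simp [List.length_take] at hk; omega
        have hkl : (lst.take j)[k] = lst[k] := List.getElem_take
        have := hfirst k hkj
        rw [List.getD_eq_getElem _ _ (by omega), hmval] at this
        rw [hkl] at hkv
        omega
    -- assemble
    rw [trick2]
    have hbody :
        (PySem.List.pyRange 0 (PySem.List.len lst)).foldl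
          (fun total i =>
            if PySem.Int.mod i 2 == 0 then total + locationOfMax lst
            else total + PySem.List.pyGetD lst i 0) 0
        = locationOfMax lst * PySem.Int.floordiv (PySem.List.len lst + 1) 2
          + (PySem.List.enumerate lst).foldl
              (fun acc p => if PySem.Int.mod p.1 2 == 1 then acc + p.2 else acc) 0 :=
      main_sum lst (locationOfMax lst)
    rw [hbody, trick2_alt, if_neg hnil, hm]
    simp only [hidx]
    rw [hloc]

-- ===== VERDICT (by name: the statement is the Claim_ definition above) =====
theorem trick2_spec : Claim_equal_trick2 := by
  intro lst _
  unfold Spec_trick2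
  exact trick2_spec' lst
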